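-- pv_equiv track=rewrite | github.com/imoutidi/newsMiningVol3 | Main_Files/graph_creation.py | assign_sentence_ids
-- ===== SOURCE A (Python) =====
-- def assign_sentence_ids(sent_rel_weights):
--     index_dict = dict()
--     entry_id = 0
--     for entity_pair in sent_rel_weights:
--         splited_pair = entity_pair.split("**")
--         for entity in splited_pair:
--             if entity not in index_dict:
--                 index_dict[entity] = entry_id
--                 entry_id += 1
--     return index_dict
-- ===== SOURCE B (Python) =====
-- def assign_sentence_ids(sent_rel_weights):
--     # Flatten all pairs into one token list, then compute each token's id
--     # directly: the number of distinct tokens before its first occurrence.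
--     tokens = [entity
--               for entity_pair in sent_rel_weights
--               for entity in entity_pair.split("**")]
--     return {t: len(set(tokens[:tokens.index(t)])) for t in tokens}
-- ===== Notes on version B (the rewrite author's own statement) =====
-- stated objective: alternative
-- what changed: B drops A's incremental counter-plus-membership state entirely: it flattens the pairs into one token list and computes each entity's id directly by a per-token formula, the number of distinct tokens preceding its first occurrence (len(set(tokens[:tokens.index(t)]))), trading O(n) for O(n^2) in exchange for a stateless formulation.
import Mathlib
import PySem

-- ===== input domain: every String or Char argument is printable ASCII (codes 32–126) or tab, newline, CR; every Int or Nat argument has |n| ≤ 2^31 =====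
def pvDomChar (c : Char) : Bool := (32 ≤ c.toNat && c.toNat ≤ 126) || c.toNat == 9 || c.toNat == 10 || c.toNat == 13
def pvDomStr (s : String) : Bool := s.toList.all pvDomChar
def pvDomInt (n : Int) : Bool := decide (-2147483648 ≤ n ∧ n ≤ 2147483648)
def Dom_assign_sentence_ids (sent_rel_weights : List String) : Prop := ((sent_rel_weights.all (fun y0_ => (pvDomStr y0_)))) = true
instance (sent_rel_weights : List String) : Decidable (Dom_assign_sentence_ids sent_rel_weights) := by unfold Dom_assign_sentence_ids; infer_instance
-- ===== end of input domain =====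

-- B replaces A's incremental counter-plus-membership loop by a stateless per-token
-- formula: each id is the number of distinct tokens before its first occurrence.
-- Objective: alternative (B is quadratic, not faster).

-- entity_pair.split("**"); the separator is nonempty so split? is always some (getD is only a totality guard)
def pvSplitPair (s : String) : List String := (PySem.Str.split? s "**").getD []

-- ===== PORT A =====
def assign_sentence_ids (sent_rel_weights : List String) : List (String × Int) :=
  (sent_rel_weights.foldl
    (fun (st : PySem.Dict String Int × Int) entity_pair =>
      (pvSplitPair entity_pair).foldl
        (fun st entity =>
          if st.1.contains entity then st
          else (st.1.insert entity st.2, st.2 + 1)) st)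
    (PySem.Dict.empty, 0)).1.items

-- ===== PORT B =====
-- len(set(tokens[:tokens.index(t)])); t is always a member of tokens, so index? is
-- always some (the getD 0 is only a totality guard)
def pvVal (tokens : List String) (t : String) : Int :=
  ((PySem.Set.ofList (PySem.List.slice tokens none
      (some (((PySem.List.index? tokens t).getD 0 : Nat) : Int)))).length : Int)

def assign_sentence_ids_alt (sent_rel_weights : List String) : List (String × Int) :=
  let tokens := sent_rel_weights.flatMap pvSplitPair
  (tokens.foldl (fun (d : PySem.Dict String Int) t => d.insert t (pvVal tokens t))
    PySem.Dict.empty).items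

-- ===== PRECONDITION & SPEC =====
def Spec_assign_sentence_ids (sent_rel_weights : List String) (out : List (String × Int)) : Prop := out = assign_sentence_ids_alt sent_rel_weights
instance (sent_rel_weights : List String) (out : List (String × Int)) : Decidable (Spec_assign_sentence_ids sent_rel_weights out) := by unfold Spec_assign_sentence_ids; infer_instance

-- ===== CLAIM (what is proved, stated in full; the proofs are below) =====
def Claim_equal_assign_sentence_ids : Prop := ∀ (sent_rel_weights : List String), Dom_assign_sentence_ids sent_rel_weights → Spec_assign_sentence_ids sent_rel_weights (assign_sentence_ids sent_rel_weights)

-- ===== LEMMAS AND PROOFS =====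

-- ---- A side: the dict A has built after registering the (distinct, in order) entities u ----
def pvToD (u : List String) : PySem.Dict String Int :=
  PySem.Dict.mk ((PySem.List.enumerate u).map (fun p => (p.2, p.1)))

def pvStep (st : PySem.Dict String Int × Int) (entity : String) : PySem.Dict String Int × Int :=
  if st.1.contains entity then st else (st.1.insert entity st.2, st.2 + 1)

theorem pvKeys_toD (u : List String) : (pvToD u).keys = u := by
  simp only [pvToD, PySem.Dict.keys, List.map_map]
  have : ((fun (x : String × Int) => x.1) ∘ fun (p : Int × String) => (p.2, p.1)) = (fun p => p.2) := rfl
  rw [this, PySem.List.map_snd_enumerate]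

theorem pvStep_eq (u : List String) (e : String) :
    pvStep (pvToD u, (u.length : Int)) e
      = (pvToD (PySem.Set.add u e), ((PySem.Set.add u e).length : Int)) := by
  by_cases h : e ∈ u
  · simp [pvStep, PySem.Dict.contains_eq_decide_mem_keys, pvKeys_toD, h, PySem.Set.add,
      PySem.Set.contains]
  · have hc : (pvToD u).contains e = false := by
      simp [PySem.Dict.contains_eq_decide_mem_keys, pvKeys_toD, h]
    have hadd : PySem.Set.add u e = u ++ [e] := by
      simp [PySem.Set.add, PySem.Set.contains, h]
    simp only [pvStep, hc, Bool.false_eq_true, if_false, hadd]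
    refine Prod.ext ?_ ?_
    · apply PySem.Dict.ext
      rw [PySem.Dict.items_insert_of_not_contains _ _ hc]
      simp [pvToD, PySem.List.enumerate_append, PySem.List.enumerate_cons]
    · simp

theorem pvInner (es u : List String) :
    es.foldl pvStep (pvToD u, (u.length : Int))
      = (pvToD (PySem.Set.update u es), ((PySem.Set.update u es).length : Int)) := by
  induction es generalizing u with
  | nil => simp [PySem.Set.update]
  | cons e es ih =>
    rw [List.foldl_cons, pvStep_eq, ih]
    simp [PySem.Set.update]

theorem pvFlatten (srw : List String) (init : PySem.Dict String Int × Int) :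
    srw.foldl (fun st p => (pvSplitPair p).foldl pvStep st) init
      = (srw.flatMap pvSplitPair).foldl pvStep init := by
  induction srw generalizing init with
  | nil => rfl
  | cons p srw ih => simp [List.flatMap_cons, List.foldl_append, ih]

theorem pvAItems (srw : List String) :
    assign_sentence_ids srw
      = (PySem.List.enumerate (PySem.List.dedup (srw.flatMap pvSplitPair))).map
          (fun p => (p.2, p.1)) := by
  unfold assign_sentence_ids
  have hinit : ((PySem.Dict.empty : PySem.Dict String Int), (0 : Int))
      = (pvToD [], (([] : List String).length : Int)) := by
    simp [pvToD, PySem.List.enumerate_nil]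
    rfl
  have hfold : (fun (st : PySem.Dict String Int × Int) entity_pair =>
      (pvSplitPair entity_pair).foldl
        (fun st entity => if st.1.contains entity then st
          else (st.1.insert entity st.2, st.2 + 1)) st)
      = fun st p => (pvSplitPair p).foldl pvStep st := rfl
  rw [hfold, hinit, pvFlatten, pvInner]
  simp [pvToD, PySem.Set.update, PySem.List.dedup_eq_ofList, PySem.Set.ofList_eq_foldl]

-- ---- B side: the dict B has built after inserting the (distinct, in order) keys u ----
def pvBD (tokens u : List String) : PySem.Dict String Int :=
  PySem.Dict.mk (u.map (fun t => (t, pvVal tokens t)))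

theorem pvKeys_bd (tokens u : List String) : (pvBD tokens u).keys = u := by
  simp [pvBD, PySem.Dict.keys, List.map_map]
  exact List.map_id u

theorem pvBStep (tokens u : List String) (t : String) :
    (pvBD tokens u).insert t (pvVal tokens t) = pvBD tokens (PySem.Set.add u t) := by
  by_cases h : t ∈ u
  · have hc : (pvBD tokens u).contains t = true := by
      simp [PySem.Dict.contains_eq_decide_mem_keys, pvKeys_bd, h]
    apply PySem.Dict.ext
    rw [PySem.Dict.items_insert_of_contains _ _ hc]
    have hadd : PySem.Set.add u t = u := by
      simp [PySem.Set.add, PySem.Set.contains, h]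
    simp only [pvBD, hadd, List.map_map]
    apply List.map_congr_left
    intro x _
    by_cases hx : x = t
    · simp [hx]
    · simp [Function.comp, hx]
  · have hc : (pvBD tokens u).contains t = false := by
      simp [PySem.Dict.contains_eq_decide_mem_keys, pvKeys_bd, h]
    have hadd : PySem.Set.add u t = u ++ [t] := by
      simp [PySem.Set.add, PySem.Set.contains, h]
    apply PySem.Dict.ext
    rw [PySem.Dict.items_insert_of_not_contains _ _ hc]
    simp [pvBD, hadd]

theorem pvBFold (tokens l u : List String) :
    l.foldl (fun d t => d.insert t (pvVal tokens t)) (pvBD tokens u)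
      = pvBD tokens (PySem.Set.update u l) := by
  induction l generalizing u with
  | nil => simp [PySem.Set.update]
  | cons t l ih =>
    rw [List.foldl_cons, pvBStep, ih]
    simp [PySem.Set.update]

theorem pvBItems (srw : List String) :
    assign_sentence_ids_alt srw
      = (PySem.List.dedup (srw.flatMap pvSplitPair)).map
          (fun t => (t, pvVal (srw.flatMap pvSplitPair) t)) := by
  have hbody : assign_sentence_ids_alt srw
      = ((srw.flatMap pvSplitPair).foldl
          (fun (d : PySem.Dict String Int) t => d.insert t (pvVal (srw.flatMap pvSplitPair) t))
          (pvBD (srw.flatMap pvSplitPair) [])).items := rfl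
  rw [hbody, pvBFold]
  simp [pvBD, PySem.Set.update, PySem.List.dedup_eq_ofList, PySem.Set.ofList_eq_foldl]

-- ---- the foldl of Set.add only appends ----
theorem pvFoldlAdd_append (l s : List String) :
    ∃ zs, l.foldl PySem.Set.add s = s ++ zs := by
  induction l generalizing s with
  | nil => exact ⟨[], by simp⟩
  | cons a l ih =>
    rw [List.foldl_cons]
    by_cases h : a ∈ s
    · have : PySem.Set.add s a = s := by simp [PySem.Set.add, PySem.Set.contains, h]
      rw [this]; exact ih s
    · have : PySem.Set.add s a = s ++ [a] := by
        simp [PySem.Set.add, PySem.Set.contains, h]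
      rw [this]
      obtain ⟨zs, hzs⟩ := ih (s ++ [a])
      exact ⟨[a] ++ zs, by simp [hzs]⟩

-- ---- key lemma: the formula value at the i-th distinct token is i ----
theorem pvVal_at (tokens : List String) (i : Nat)
    (hi : i < (PySem.Set.ofList tokens).length) :
    pvVal tokens (PySem.Set.ofList tokens)[i] = (i : Int) := by
  set u := PySem.Set.ofList tokens with hu
  set t := u[i] with ht
  have htmem : t ∈ tokens := by
    have : t ∈ u := List.getElem_mem hi
    rw [hu] at this
    exact (PySem.Set.mem_ofList _ _).mp this
  obtain ⟨k, hk⟩ : ∃ k, PySem.List.index? tokens t = some k := by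
    have := (PySem.List.index?_isSome_iff (xs := tokens) (v := t)).mpr htmem
    exact Option.isSome_iff_exists.mp this
  obtain ⟨pre, suf, hsplit, hlen, hnotpre⟩ :=
    (PySem.List.index?_eq_some_iff (xs := tokens) (v := t) (k := k)).mp hk
  -- the slice is exactly pre
  have hslice : PySem.List.slice tokens none (some ((k : Nat) : Int)) = pre := by
    rw [PySem.List.slice_to_natCast, hsplit, ← hlen, List.take_left]
  -- u decomposes as (ofList pre) ++ t :: zs
  have hdec : ∃ zs, u = PySem.Set.ofList pre ++ t :: zs := by
    rw [hu, hsplit, PySem.Set.ofList_eq_foldl, List.foldl_append, List.foldl_cons]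
    have hadd : PySem.Set.add (List.foldl PySem.Set.add [] pre) t
        = List.foldl PySem.Set.add [] pre ++ [t] := by
      have : t ∉ List.foldl PySem.Set.add [] pre := by
        rw [← PySem.Set.ofList_eq_foldl]
        intro hm
        exact hnotpre ((PySem.Set.mem_ofList _ _).mp hm)
      simp [PySem.Set.add, PySem.Set.contains, this]
    rw [hadd]
    obtain ⟨zs, hzs⟩ := pvFoldlAdd_append suf (List.foldl PySem.Set.add [] pre ++ [t])
    exact ⟨zs, by rw [hzs, PySem.Set.ofList_eq_foldl]; simp⟩
  obtain ⟨zs, hzs⟩ := hdec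
  set m := (PySem.Set.ofList pre).length with hm
  have hmlt : m < u.length := by rw [hzs]; simp; omega
  have humt : u[m] = t := by
    rw [List.getElem_of_eq hzs]
    rw [List.getElem_append_right (by omega : (PySem.Set.ofList pre).length ≤ m)]
    have h0 : m - (PySem.Set.ofList pre).length = 0 := by omega
    simp [h0]
  have hnd : u.Nodup := by rw [hu]; exact PySem.Set.nodup_ofList tokens
  have him : i = m := by
    have : u[i] = u[m] := by rw [humt, ← ht]
    exact (List.Nodup.getElem_inj_iff hnd).mp this
  unfold pvVal
  rw [hk]
  simp only [Option.getD_some]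
  rw [hslice, ← hm, ← him]

-- ===== VERDICT (by name: the statement is the Claim_ definition above) =====
theorem assign_sentence_ids_spec : Claim_equal_assign_sentence_ids := by
  intro srw _
  unfold Spec_assign_sentence_ids
  rw [pvAItems, pvBItems]
  set tokens := srw.flatMap pvSplitPair
  rw [PySem.List.dedup_eq_ofList]
  set u := PySem.Set.ofList tokens with hu
  apply List.ext_getElem
  · simp [PySem.List.length_enumerate]
  · intro i h1 h2
    have hi : i < u.length := by simpa using h1
    simp only [List.getElem_map, PySem.List.getElem_enumerate]
    rw [pvVal_at tokens i (by rw [← hu]; exact hi)]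
    simp
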